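-- pv_equiv track=rewrite | github.com/Tomsalus/python-files | p6_next.py | next_multiple
-- ===== SOURCE A (Python) =====
-- def next_multiple(number,k):
--     number+=1
--     found = False
--     while (found == False):
--         if (number % k == 0):
--             found = True
--         else:
--             number +=1
--     return number
-- ===== SOURCE B (Python) =====
-- def next_multiple(number, k):
--     m = number + 1
--     return m + (-m) % abs(k)
-- ===== Notes on version B (the rewrite author's own statement) =====
-- stated objective: faster
-- what changed: Replaces A's increment-and-test loop (up to |k| iterations) with the closed-form formula m + (-m) % abs(k) where m = number + 1.
import Mathlib
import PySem

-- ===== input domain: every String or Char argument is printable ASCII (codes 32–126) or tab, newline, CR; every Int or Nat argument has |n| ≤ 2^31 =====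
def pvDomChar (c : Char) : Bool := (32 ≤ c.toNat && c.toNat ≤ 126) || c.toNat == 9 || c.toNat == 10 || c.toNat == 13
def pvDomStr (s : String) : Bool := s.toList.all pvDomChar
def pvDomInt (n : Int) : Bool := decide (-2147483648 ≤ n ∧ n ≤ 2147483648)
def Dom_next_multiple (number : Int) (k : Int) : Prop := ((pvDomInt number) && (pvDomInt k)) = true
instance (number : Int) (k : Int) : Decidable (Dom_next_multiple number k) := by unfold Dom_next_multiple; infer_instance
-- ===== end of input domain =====

-- B replaces A's increment-and-test loop with the closed-form m + (-m) % abs(k), m = number+1 (O(1) vs O(k)); both raise on k = 0, excluded by Pre_.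


-- ===== PORT A =====
-- the while loop; fuel = |k| is only a totality guard (the loop tests at most |k| candidates before hitting a multiple)
def nmLoop (number : Int) (k : Int) : Nat → Int
  | 0 => number
  | n+1 => if PySem.Int.mod number k = 0 then number else nmLoop (number + 1) k n

def next_multiple (number : Int) (k : Int) : Int :=
  nmLoop (number + 1) k k.natAbs

-- ===== PORT B =====
def next_multiple_alt (number : Int) (k : Int) : Int :=
  let m := number + 1
  m + PySem.Int.mod (-m) |k|

-- ===== PRECONDITION & SPEC =====
-- k = 0 makes '%' raise ZeroDivisionError in both A and B
def Pre_next_multiple (number : Int) (k : Int) : Prop := k ≠ 0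
instance (number : Int) (k : Int) : Decidable (Pre_next_multiple number k) := by unfold Pre_next_multiple; infer_instance
def pvWitness_next_multiple : Int × Int := (7, 3)

def Spec_next_multiple (number : Int) (k : Int) (out : Int) : Prop := out = next_multiple_alt number k
instance (number : Int) (k : Int) (out : Int) : Decidable (Spec_next_multiple number k out) := by unfold Spec_next_multiple; infer_instance

-- ===== CLAIM (what is proved, stated in full; the proofs are below) =====
def Claim_equal_next_multiple : Prop := ∀ (number : Int) (k : Int), Dom_next_multiple number k → Pre_next_multiple number k → Spec_next_multiple number k (next_multiple number k)

-- ===== LEMMAS AND PROOFS =====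

theorem nmLoop_eq (n : Nat) : ∀ (m k : Int), k ≠ 0 → ((-m) % |k|).toNat < n →
    nmLoop m k n = m + (-m) % |k| := by
  induction n with
  | zero => intro m k hk h; omega
  | succ n ih =>
    intro m k hk h
    have hkpos : (0:Int) < |k| := abs_pos.mpr hk
    have h1 : (0:Int) ≤ (-m) % |k| := Int.emod_nonneg _ (ne_of_gt hkpos)
    have h2 : (-m) % |k| < |k| := Int.emod_lt_of_pos _ hkpos
    simp only [nmLoop]
    by_cases hd : PySem.Int.mod m k = 0
    · have hdvd : k ∣ m := (PySem.Int.mod_eq_zero_iff_dvd m k).mp hd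
      have hdvd2 : |k| ∣ -m := (abs_dvd k (-m)).mpr (Dvd.dvd.neg_right hdvd)
      have hz : (-m) % |k| = 0 := Int.emod_eq_zero_of_dvd hdvd2
      simp [hd, hz]
    · have hndvd : ¬ k ∣ m := fun hc => hd ((PySem.Int.mod_eq_zero_iff_dvd m k).mpr hc)
      have hnz : (-m) % |k| ≠ 0 := by
        intro hz
        exact hndvd ((abs_dvd k m).mp (Int.dvd_neg.mp (Int.dvd_of_emod_eq_zero hz)))
      have e1 : (1:Int) % |k| = 1 := Int.emod_eq_of_lt (by omega) (by omega)
      have hstep : (-(m + 1)) % |k| = (-m) % |k| - 1 := by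
        have hh : -(m+1) = -m - 1 := by ring
        rw [hh, Int.sub_emod, e1, Int.emod_eq_of_lt (by omega) (by omega)]
      rw [if_neg hd, ih (m+1) k hk (by omega), hstep]
      ring

-- ===== VERDICT (by name: the statement is the Claim_ definition above) =====
theorem next_multiple_spec : Claim_equal_next_multiple := by
  intro number k _ hk
  unfold Spec_next_multiple next_multiple next_multiple_alt
  show nmLoop (number + 1) k k.natAbs = (number + 1) + PySem.Int.mod (-(number + 1)) |k|
  have hkpos : (0:Int) < |k| := abs_pos.mpr hk
  have hm : PySem.Int.mod (-(number+1)) |k| = (-(number+1)) % |k| :=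
    PySem.Int.mod_eq_emod_of_pos hkpos
  have hlt : ((-(number+1)) % |k|).toNat < k.natAbs := by
    have h2 := Int.emod_lt_of_pos (-(number+1)) hkpos
    have h1 := Int.emod_nonneg (-(number+1)) (ne_of_gt hkpos)
    have h3 : (|k| : Int) = (k.natAbs : Int) := Int.abs_eq_natAbs k
    omega
  rw [nmLoop_eq k.natAbs (number+1) k hk hlt, hm]
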